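-- pv_equiv track=rewrite | github.com/manushi7/password-strength | passwordstrength.py | check_alphanumeric_count
-- ===== SOURCE A (Python) =====
-- def check_alphanumeric_count(a):
--     chars = ['@', '$', '%', '#', '&', '"', '!', '*', '^', "'"]
--     s = []
--     for i in a:
--         for j in chars:
--             if i == j:
--                 s.append(True)
--     if len(s) >= 2:
--         return True
--     else:
--         return False
-- ===== SOURCE B (Python) =====
-- def check_alphanumeric_count(a):
--     freq = {}
--     for ch in a:
--         freq[ch] = freq.get(ch, 0) + 1
--     total = 0
--     for c in ['@', '$', '%', '#', '&', '"', '!', '*', '^', "'"]: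
--         total += freq.get(c, 0)
--     return total >= 2
-- ===== Notes on version B (the rewrite author's own statement) =====
-- stated objective: faster
-- what changed: B builds a character frequency table of the input in one pass and then sums the counts of the ten special characters via dict lookups, replacing A's nested loop over every (input char, special char) pair and its boolean-append list.
import Mathlib
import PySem

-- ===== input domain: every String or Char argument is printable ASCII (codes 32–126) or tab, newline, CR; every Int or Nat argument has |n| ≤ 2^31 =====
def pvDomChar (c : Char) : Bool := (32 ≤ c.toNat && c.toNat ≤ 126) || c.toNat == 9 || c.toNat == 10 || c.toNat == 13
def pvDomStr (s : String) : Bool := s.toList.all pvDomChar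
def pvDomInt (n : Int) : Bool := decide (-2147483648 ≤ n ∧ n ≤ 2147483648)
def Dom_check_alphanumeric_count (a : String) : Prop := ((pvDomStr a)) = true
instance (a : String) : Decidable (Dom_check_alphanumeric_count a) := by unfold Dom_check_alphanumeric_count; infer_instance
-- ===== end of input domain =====

-- B replaces A's nested (input char × special char) loop and boolean-append list by a one-pass
-- character frequency dict followed by ten lookups summed over the specials; return value only.

-- ===== PORT A =====
def check_alphanumeric_count (a : String) : Bool :=
  let chars : List Char := ['@', '$', '%', '#', '&', '"', '!', '*', '^', '\'']
  let s : List Bool :=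
    a.toList.foldl (fun s i =>
      chars.foldl (fun s j => if i == j then s ++ [true] else s) s) []
  if s.length ≥ 2 then true else false

-- ===== PORT B =====
def check_alphanumeric_count_alt (a : String) : Bool :=
  let freq : PySem.Dict Char Int :=
    a.toList.foldl (fun d ch => d.insert ch (d.getD ch 0 + 1)) PySem.Dict.empty
  let total : Int :=
    (['@', '$', '%', '#', '&', '"', '!', '*', '^', '\''] : List Char).foldl
      (fun t c => t + freq.getD c 0) 0
  decide (total ≥ 2)

-- ===== PRECONDITION & SPEC =====
def Spec_check_alphanumeric_count (a : String) (out : Bool) : Prop := out = check_alphanumeric_count_alt a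
instance (a : String) (out : Bool) : Decidable (Spec_check_alphanumeric_count a out) := by unfold Spec_check_alphanumeric_count; infer_instance

-- ===== CLAIM (what is proved, stated in full; the proofs are below) =====
def Claim_equal_check_alphanumeric_count : Prop := ∀ (a : String), Dom_check_alphanumeric_count a → Spec_check_alphanumeric_count a (check_alphanumeric_count a)

-- ===== LEMMAS AND PROOFS =====

-- A's outer loop: the list s grows, for each input char, by one `true` per matching special.
theorem pvA_len (cs : List Char) (xs : List Char) (s : List Bool) :
    (xs.foldl (fun s i => cs.foldl (fun s j => if i == j then s ++ [true] else s) s) s).length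
      = s.length + (xs.map (fun i => cs.count i)).sum := by
  induction xs generalizing s with
  | nil => simp
  | cons i xs ih =>
      simp only [List.foldl_cons, ih, List.map_cons, List.sum_cons]
      rw [PySem.List.foldl_append_if (fun j => i == j) (fun _ => true) cs s]
      have hf : cs.filter (fun j => i == j) = cs.filter (fun j => j == i) := by
        apply List.filter_congr
        intro j _
        simp [BEq.comm]
      simp [hf, List.count, List.countP_eq_length_filter]
      omega

-- double counting: summing per-input-char matches equals summing per-special occurrence counts
theorem pvSwap (cs : List Char) (xs : List Char) :
    ((xs.map (fun i => cs.count i)).sum : Int)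
      = cs.foldl (fun t c => t + (xs.count c : Int)) 0 := by
  rw [PySem.List.foldl_add]
  induction xs with
  | nil => simp
  | cons i xs ih =>
      simp only [List.map_cons, List.sum_cons, Nat.cast_add, ih]
      have hmap : cs.map (fun c => (List.count c (i :: xs) : Int))
          = cs.map (fun c => (List.count c xs : Int) + (if c == i then 1 else 0)) := by
        apply List.map_congr_left
        intro c _
        rw [List.count_cons]
        push_cast
        rw [show (i == c) = (c == i) from by simp [BEq.comm]]
      rw [hmap, PySem.List.sum_map_add_int, PySem.List.sum_map_ite_one_zero]
      have hc : cs.countP (fun c => c == i) = cs.count i := by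
        simp [List.count]
      rw [hc]
      ring

theorem check_alphanumeric_count_eq (a : String) :
    check_alphanumeric_count a = check_alphanumeric_count_alt a := by
  unfold check_alphanumeric_count check_alphanumeric_count_alt
  simp only [pvA_len, PySem.Dict.getD_foldl_insert_add_one, PySem.Dict.getD_empty, zero_add]
  rw [← pvSwap]
  simp only [List.length_nil, Nat.zero_add]
  by_cases h : (a.toList.map (fun i => List.count i ['@', '$', '%', '#', '&', '"', '!', '*', '^', '\''])).sum ≥ 2
  · simp only [h, if_true]
    symm
    rw [decide_eq_true_iff]
    exact_mod_cast h
  · simp only [h, if_false]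
    symm
    rw [decide_eq_false_iff_not]
    intro hc
    exact h (by exact_mod_cast hc)

-- ===== VERDICT (by name: the statement is the Claim_ definition above) =====
theorem check_alphanumeric_count_spec : Claim_equal_check_alphanumeric_count := by
  intro a _
  unfold Spec_check_alphanumeric_count
  exact check_alphanumeric_count_eq a
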